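-- pv_equiv track=rewrite | github.com/niuyunda/agent-wave | src/agvv/cli/feedback_cmd.py | _normalize_repo_ref
-- ===== SOURCE A (Python) =====
-- def _normalize_repo_ref(repo: str) -> str:
--     candidate = repo.strip()
--     if candidate.startswith(("https://github.com/", "http://github.com/")):
--         tail = candidate.rstrip("/").split("github.com/", 1)[1]
--         parts = [p for p in tail.split("/") if p]
--         if len(parts) >= 2:
--             return f"{parts[0]}/{parts[1].removesuffix('.git')}"
--     return candidate
-- ===== SOURCE B (Python) =====
-- def _normalize_repo_ref(repo: str) -> str:
--     candidate = repo.strip()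
--     for prefix in ("https://github.com/", "http://github.com/"):
--         if candidate.startswith(prefix):
--             owner, _, rest = candidate[len(prefix):].lstrip("/").partition("/")
--             name, _, _ = rest.lstrip("/").partition("/")
--             if owner and name:
--                 return f"{owner}/{name.removesuffix('.git')}"
--             break
--     return candidate
-- ===== Notes on version B (the rewrite author's own statement) =====
-- stated objective: idiomatic
-- what changed: B drops A's pipeline (rstrip, split at the first host-name occurrence, split on slashes, filter out empty parts, slice) and instead slices off the matched prefix and extracts the two path segments directly with lstrip and partition; Pre_ excludes only the inputs where A raises IndexError (a github URL with nothing but slashes after the host), where B returns the stripped input.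
import Mathlib
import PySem

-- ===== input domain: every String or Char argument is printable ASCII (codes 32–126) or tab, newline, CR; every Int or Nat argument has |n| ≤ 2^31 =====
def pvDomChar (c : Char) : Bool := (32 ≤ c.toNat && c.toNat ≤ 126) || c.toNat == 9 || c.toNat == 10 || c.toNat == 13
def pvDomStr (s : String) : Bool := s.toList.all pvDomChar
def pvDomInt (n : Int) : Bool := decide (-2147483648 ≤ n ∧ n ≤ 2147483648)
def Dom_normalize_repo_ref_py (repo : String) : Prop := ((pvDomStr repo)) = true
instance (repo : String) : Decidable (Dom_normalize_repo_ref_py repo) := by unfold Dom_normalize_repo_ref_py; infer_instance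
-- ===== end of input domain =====

-- B replaces A's rstrip/split-on-host/filter/slice pipeline by a direct two-segment scan of the part after the prefix (lstrip + partition, twice); alternative decomposition, no speed claim.

-- ===== PORT A =====
-- candidate.rstrip("/") — strips only '/' from the right (exact)
def aRstripSlash (cs : List Char) : List Char := (cs.reverse.dropWhile (· == '/')).reverse

-- p.removesuffix(".git") — drops one trailing ".git" if present (exact)
def aRemoveSuffixGit (p : List Char) : List Char :=
  if PySem.Chars.endswith p ".git".toList then p.take (p.length - 4) else p

def normalize_repo_ref_py (repo : String) : String :=
  let candidate := PySem.Str.strip repo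
  if PySem.Str.startswith candidate "https://github.com/" || PySem.Str.startswith candidate "http://github.com/" then
    let pieces := (PySem.Chars.splitMax? (aRstripSlash candidate.toList) "github.com/".toList 1).getD []
    -- Python's `[1]` raises IndexError when the split produced a single piece; Pre_ excludes exactly those inputs (the .getD [] default is unreachable under Pre_)
    let tail := (PySem.List.pyGet? pieces 1).getD []
    let parts := (PySem.Chars.splitOn tail "/".toList).filter (fun p => !p.isEmpty)
    if 2 ≤ parts.length then
      String.ofList (parts.getD 0 [] ++ '/' :: aRemoveSuffixGit (parts.getD 1 []))
    else candidate
  else candidate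

-- ===== PORT B =====
-- s.lstrip("/") (exact)
def bLstripSlash (cs : List Char) : List Char := cs.dropWhile (· == '/')

-- s.partition("/") projected to (before, after) — the two components B uses (exact)
def bPartSlash (cs : List Char) : List Char × List Char :=
  (cs.takeWhile (· != '/'), (cs.dropWhile (· != '/')).drop 1)

-- name.removesuffix(".git") (exact)
def bRemoveSuffixGit (p : List Char) : List Char :=
  if PySem.Chars.endswith p ".git".toList then p.take (p.length - 4) else p

-- body of B's loop for one matching prefix: candidate[len(prefix):] is `tail`; `some` = early return
def bPick (tail : List Char) : Option (List Char) :=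
  let ow := bPartSlash (bLstripSlash tail)
  let nm := bPartSlash (bLstripSlash ow.2)
  if ow.1 ≠ [] ∧ nm.1 ≠ [] then some (ow.1 ++ '/' :: bRemoveSuffixGit nm.1) else none

def normalize_repo_ref_py_alt (repo : String) : String :=
  let candidate := PySem.Str.strip repo
  if PySem.Str.startswith candidate "https://github.com/" then
    match bPick (candidate.toList.drop 19) with
    | some out => String.ofList out
    | none => candidate
  else if PySem.Str.startswith candidate "http://github.com/" then
    match bPick (candidate.toList.drop 18) with
    | some out => String.ofList out
    | none => candidate
  else candidate

-- ===== PRECONDITION & SPEC =====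
-- true exactly when the stripped input is a github URL whose part after the scheme+host prefix consists only of slashes
def pvBadRepo (repo : String) : Bool :=
  let c := (PySem.Str.strip repo).toList
  (PySem.Chars.startswith c "https://github.com/".toList && (c.drop 19).all (· == '/'))
    || (PySem.Chars.startswith c "http://github.com/".toList && (c.drop 18).all (· == '/'))

-- Pre_ excludes exactly the inputs on which A raises IndexError: a github URL with nothing but slashes after the host.
def Pre_normalize_repo_ref_py (repo : String) : Prop := pvBadRepo repo = false
instance (repo : String) : Decidable (Pre_normalize_repo_ref_py repo) := by unfold Pre_normalize_repo_ref_py; infer_instance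
def pvWitness_normalize_repo_ref_py : String := "  https://github.com/octo/repo.git "

def Spec_normalize_repo_ref_py (repo : String) (out : String) : Prop := out = normalize_repo_ref_py_alt repo
instance (repo : String) (out : String) : Decidable (Spec_normalize_repo_ref_py repo out) := by unfold Spec_normalize_repo_ref_py; infer_instance

-- ===== CLAIM (what is proved, stated in full; the proofs are below) =====
def Claim_equal_normalize_repo_ref_py : Prop := ∀ (repo : String), Dom_normalize_repo_ref_py repo → Pre_normalize_repo_ref_py repo → Spec_normalize_repo_ref_py repo (normalize_repo_ref_py repo)

-- ===== LEMMAS AND PROOFS =====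

-- splitOnMax.go with 0 splits left returns the remainder as the last piece, whatever the fuel
lemma go_m0 (sep : List Char) (fuel : Nat) (l cur : List Char) (acc : List (List Char)) :
    PySem.Chars.splitOnMax.go sep fuel 0 l cur acc = ((cur.reverse ++ l) :: acc).reverse := by
  cases fuel <;> cases l <;> simp [PySem.Chars.splitOnMax.go]

lemma go_succ_ne (sep : List Char) (fuel : Nat) (m : Nat) (c : Char) (rest cur : List Char) (acc : List (List Char))
    (h : sep.isPrefixOf (c :: rest) = false) (hm : m ≠ 0) :
    PySem.Chars.splitOnMax.go sep (fuel + 1) m (c :: rest) cur acc = PySem.Chars.splitOnMax.go sep fuel m rest (c :: cur) acc := by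
  simp [PySem.Chars.splitOnMax.go, h, hm]

lemma go_succ_pre (sep : List Char) (fuel : Nat) (m : Nat) (c : Char) (rest cur : List Char) (acc : List (List Char))
    (h : sep.isPrefixOf (c :: rest) = true) (hm : m ≠ 0) :
    PySem.Chars.splitOnMax.go sep (fuel + 1) m (c :: rest) cur acc = PySem.Chars.splitOnMax.go sep fuel (m - 1) ((c :: rest).drop sep.length) [] (cur.reverse :: acc) := by
  simp [PySem.Chars.splitOnMax.go, h, hm]

-- skip a block u none of whose characters is 'g' (the separator starts with 'g')
lemma go_skip (sep2 : List Char) (u : List Char) (hu : ∀ c ∈ u, c ≠ 'g') :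
    ∀ (fuel m : Nat) (l cur : List Char) (acc : List (List Char)), m ≠ 0 →
    PySem.Chars.splitOnMax.go ('g' :: sep2) (fuel + u.length) m (u ++ l) cur acc
      = PySem.Chars.splitOnMax.go ('g' :: sep2) fuel m l (u.reverse ++ cur) acc := by
  induction u with
  | nil => intro fuel m l cur acc _; simp
  | cons c u' ih =>
    intro fuel m l cur acc hm
    have hc : c ≠ 'g' := hu c (by simp)
    have h1 : (fuel + (c :: u').length) = (fuel + u'.length) + 1 := by simp [List.length_cons]; omega
    rw [h1]
    simp only [List.cons_append]
    have hne : ('g' :: sep2).isPrefixOf (c :: (u' ++ l)) = false := by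
      simp [List.isPrefixOf]; intro h; exact absurd h.symm hc
    rw [go_succ_ne ('g' :: sep2) (fuel + u'.length) m c (u' ++ l) cur acc hne hm]
    rw [ih (fun d hd => hu d (by simp [hd])) fuel m l (c :: cur) acc hm]
    simp

set_option maxRecDepth 10000 in
lemma splitOnMax_sep_https (t : List Char) :
    PySem.Chars.splitOnMax ("https://github.com/".toList ++ t) "github.com/".toList 1 = ["https://".toList, t] := by
  have hpre : "https://github.com/".toList = "https://".toList ++ "github.com/".toList := by decide
  unfold PySem.Chars.splitOnMax
  rw [if_neg (by omega : ¬((1:Int) < 0))]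
  have h1n : (1:Int).toNat = 1 := rfl
  rw [h1n]
  have hlen : ("https://github.com/".toList ++ t).length + 1 = (t.length + 12) + "https://".toList.length := by
    rw [List.length_append]
    have h19 : ("https://github.com/".toList).length = 19 := by decide
    have h8 : ("https://".toList).length = 8 := by decide
    omega
  rw [hlen, hpre, List.append_assoc]
  have hsep : "github.com/".toList = 'g' :: "ithub.com/".toList := by decide
  rw [hsep]
  have hug : ∀ c ∈ "https://".toList, c ≠ 'g' := by
    rw [show "https://".toList = ['h','t','t','p','s',':','/','/'] by decide]
    intro c hc; fin_cases hc <;> decide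
  rw [go_skip "ithub.com/".toList "https://".toList hug (t.length + 12) 1 _ [] [] (by omega)]
  have h12 : t.length + 12 = (t.length + 11) + 1 := by omega
  rw [h12]
  have hcons : ('g' :: "ithub.com/".toList) ++ t = 'g' :: ("ithub.com/".toList ++ t) := by simp
  have hpref : ('g' :: "ithub.com/".toList).isPrefixOf ('g' :: ("ithub.com/".toList ++ t)) = true := by
    rw [List.isPrefixOf_iff_prefix]; exact ⟨t, by simp⟩
  rw [hcons, go_succ_pre _ _ _ _ _ _ _ hpref (by omega)]
  simp [go_m0]

set_option maxRecDepth 10000 in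
lemma splitOnMax_sep_http (t : List Char) :
    PySem.Chars.splitOnMax ("http://github.com/".toList ++ t) "github.com/".toList 1 = ["http://".toList, t] := by
  have hpre : "http://github.com/".toList = "http://".toList ++ "github.com/".toList := by decide
  unfold PySem.Chars.splitOnMax
  rw [if_neg (by omega : ¬((1:Int) < 0))]
  have h1n : (1:Int).toNat = 1 := rfl
  rw [h1n]
  have hlen : ("http://github.com/".toList ++ t).length + 1 = (t.length + 12) + "http://".toList.length := by
    rw [List.length_append]
    have h18 : ("http://github.com/".toList).length = 18 := by decide
    have h7 : ("http://".toList).length = 7 := by decide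
    omega
  rw [hlen, hpre, List.append_assoc]
  have hsep : "github.com/".toList = 'g' :: "ithub.com/".toList := by decide
  rw [hsep]
  have hug : ∀ c ∈ "http://".toList, c ≠ 'g' := by
    rw [show "http://".toList = ['h','t','t','p',':','/','/'] by decide]
    intro c hc; fin_cases hc <;> decide
  rw [go_skip "ithub.com/".toList "http://".toList hug (t.length + 12) 1 _ [] [] (by omega)]
  have h12 : t.length + 12 = (t.length + 11) + 1 := by omega
  rw [h12]
  have hcons : ('g' :: "ithub.com/".toList) ++ t = 'g' :: ("ithub.com/".toList ++ t) := by simp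
  have hpref : ('g' :: "ithub.com/".toList).isPrefixOf ('g' :: ("ithub.com/".toList ++ t)) = true := by
    rw [List.isPrefixOf_iff_prefix]; exact ⟨t, by simp⟩
  rw [hcons, go_succ_pre _ _ _ _ _ _ _ hpref (by omega)]
  simp [go_m0]

-- the nonempty '/'-separated segments of a list, left to right
def segs : List Char → List (List Char)
  | [] => []
  | c :: rest =>
    if c == '/' then segs rest
    else (c :: rest.takeWhile (· != '/')) :: segs (rest.dropWhile (· != '/'))
termination_by l => l.length
decreasing_by
  all_goals simp [List.length_dropWhile_le]

lemma segs_drop_tail (l : List Char) :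
    segs (l.dropWhile (· != '/')) = segs ((l.dropWhile (· != '/')).tail) := by
  induction l with
  | nil => simp
  | cons c r ih =>
    by_cases hc : c = '/'
    · subst hc; simp [List.dropWhile, segs]
    · have hcb : (c == '/') = false := by simp [hc]
      simpa [List.dropWhile, bne, hcb] using ih

lemma segs_take_drop (l : List Char) :
    segs l = (if (l.takeWhile (· != '/')).isEmpty then [] else [l.takeWhile (· != '/')])
      ++ segs ((l.dropWhile (· != '/')).tail) := by
  cases l with
  | nil => simp [segs]
  | cons c r =>
    by_cases hc : c = '/'
    · subst hc; simp [segs, List.takeWhile, List.dropWhile]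
    · have hcb : (c == '/') = false := by simp [hc]
      simp [segs, List.takeWhile, List.dropWhile, bne, hcb]
      simpa [bne] using segs_drop_tail r

lemma go_splitOn_spec (fuel : Nat) : ∀ (l cur : List Char) (acc : List (List Char)), l.length ≤ fuel →
    (PySem.Chars.splitOn.go ['/'] fuel l cur acc).filter (fun p => !p.isEmpty)
      = acc.reverse.filter (fun p => !p.isEmpty)
        ++ (if (cur.reverse ++ l.takeWhile (· != '/')).isEmpty then [] else [cur.reverse ++ l.takeWhile (· != '/')])
        ++ segs ((l.dropWhile (· != '/')).tail) := by
  induction fuel with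
  | zero =>
    intro l cur acc hl
    have : l = [] := by cases l <;> simp_all
    subst this
    simp [PySem.Chars.splitOn.go, List.filter_append, segs]
    by_cases hcur : cur = [] <;> simp [hcur]
  | succ fuel ih =>
    intro l cur acc hl
    cases l with
    | nil =>
      simp [PySem.Chars.splitOn.go, List.filter_append, segs]
      by_cases hcur : cur = [] <;> simp [hcur]
    | cons c rest =>
      by_cases hc : c = '/'
      · subst hc
        have hstep : PySem.Chars.splitOn.go ['/'] (fuel+1) ('/'::rest) cur acc
            = PySem.Chars.splitOn.go ['/'] fuel rest [] (cur.reverse :: acc) := by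
          simp [PySem.Chars.splitOn.go, List.isPrefixOf]
        rw [hstep, ih rest [] (cur.reverse :: acc) (by simpa using hl)]
        simp [List.filter_append, List.takeWhile, List.dropWhile, segs_take_drop rest]
        by_cases hcur : cur = [] <;> simp [hcur]
      · have hstep : PySem.Chars.splitOn.go ['/'] (fuel+1) (c::rest) cur acc
            = PySem.Chars.splitOn.go ['/'] fuel rest (c :: cur) acc := by
          simp [PySem.Chars.splitOn.go, List.isPrefixOf, Ne.symm hc]
        rw [hstep, ih rest (c :: cur) acc (by simpa using hl)]
        have hcb : (c == '/') = false := by simp [hc]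
        simp [List.takeWhile, List.dropWhile, bne, hcb]

lemma filter_splitOn (l : List Char) :
    (PySem.Chars.splitOn l "/".toList).filter (fun p => !p.isEmpty) = segs l := by
  have hsep : "/".toList = ['/'] := by decide
  rw [hsep]
  unfold PySem.Chars.splitOn
  rw [go_splitOn_spec (l.length + 1) l [] [] (by omega)]
  simp only [List.reverse_nil, List.filter_nil, List.nil_append]
  exact (segs_take_drop l).symm

lemma segs_lstrip (t : List Char) : segs (t.dropWhile (· == '/')) = segs t := by
  induction t with
  | nil => simp
  | cons c r ih =>
    by_cases hc : c = '/'
    · subst hc; simpa [List.dropWhile, segs] using ih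
    · have hcb : (c == '/') = false := by simp [hc]
      simp [List.dropWhile, hcb]

lemma dropWhile_slash_head (t : List Char) (c : Char) (r : List Char)
    (h : t.dropWhile (· == '/') = c :: r) : (c == '/') = false := by
  induction t with
  | nil => simp at h
  | cons d s ih =>
    by_cases hd : d = '/'
    · subst hd; simp [List.dropWhile] at h; exact ih h
    · have hdb : (d == '/') = false := by simp [hd]
      simp [List.dropWhile, hdb] at h
      simp [← h.1, hd]

-- B's two extraction steps, as functions of the tail after the prefix
def ownerOf (t : List Char) : List Char := (t.dropWhile (· == '/')).takeWhile (· != '/')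
def restOf (t : List Char) : List Char := ((t.dropWhile (· == '/')).dropWhile (· != '/')).drop 1

lemma segs_eq_owner (t : List Char) :
    segs t = if ownerOf t = [] then [] else ownerOf t :: segs (restOf t) := by
  rw [← segs_lstrip t]
  unfold ownerOf restOf
  cases hlt : t.dropWhile (· == '/') with
  | nil => simp [segs]
  | cons c r =>
    have hcb : (c == '/') = false := dropWhile_slash_head t c r hlt
    simp [segs, hcb, List.takeWhile, List.dropWhile, bne, List.drop_one]
    exact segs_drop_tail r

lemma segs_all_slash (u : List Char) (h : ∀ c ∈ u, c = '/') : segs u = [] := by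
  induction u with
  | nil => simp [segs]
  | cons c r ih =>
    have : c = '/' := h c (by simp)
    subst this
    simp [segs]
    exact ih (fun d hd => h d (by simp [hd]))

lemma segs_append_slashes (t u : List Char) (hu : ∀ c ∈ u, c = '/') : segs (t ++ u) = segs t := by
  induction t using segs.induct with
  | case1 => simpa [segs] using segs_all_slash u hu
  | case2 c rest hc ih =>
    simp at hc; subst hc
    simpa [segs] using ih
  | case3 c rest hc ih =>
    have hcb : (c == '/') = false := by simpa using hc
    rw [List.cons_append, segs, segs]
    simp only [hcb, Bool.false_eq_true, if_false]
    rw [List.takeWhile_append, List.dropWhile_append]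
    by_cases hdw : rest.dropWhile (· != '/') = []
    · have htw : rest.takeWhile (· != '/') = rest := by
        have := List.takeWhile_append_dropWhile (p := (· != '/')) (l := rest)
        rw [hdw] at this; simpa using this
      have hutw : u.takeWhile (· != '/') = [] := by
        cases u with
        | nil => rfl
        | cons d v => have : d = '/' := hu d (by simp); subst this; simp [List.takeWhile, bne]
      have hudw : u.dropWhile (· != '/') = u := by
        cases u with
        | nil => rfl
        | cons d v => have : d = '/' := hu d (by simp); subst this; simp [List.dropWhile, bne]
      simp [hdw, htw, hutw, hudw, segs_all_slash u hu, segs_all_slash]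
    · have hlen : (rest.takeWhile (· != '/')).length ≠ rest.length := by
        intro hl
        apply hdw
        have hsplit := List.takeWhile_append_dropWhile (p := (· != '/')) (l := rest)
        have hlen2 := congrArg List.length hsplit
        rw [List.length_append] at hlen2
        rw [← List.length_eq_zero_iff]
        omega
      simp [hdw, hlen]
      exact ih

lemma rstrip_decomp (t : List Char) :
    t = aRstripSlash t ++ (t.reverse.takeWhile (· == '/')).reverse ∧
      (∀ c ∈ (t.reverse.takeWhile (· == '/')).reverse, c = '/') := by
  constructor
  · unfold aRstripSlash
    conv_lhs => rw [← List.reverse_reverse t, ← List.takeWhile_append_dropWhile (p := (· == '/')) (l := t.reverse)]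
    rw [List.reverse_append]
  · intro c hc
    rw [List.mem_reverse] at hc
    have := List.mem_takeWhile_imp hc
    simpa using this

lemma segs_rstrip (t : List Char) : segs (aRstripSlash t) = segs t := by
  obtain ⟨hdec, hall⟩ := rstrip_decomp t
  conv_rhs => rw [hdec]
  exact (segs_append_slashes _ _ hall).symm

lemma rstrip_append (u t : List Char) (h : ∃ c ∈ t, (c == '/') = false) :
    aRstripSlash (u ++ t) = u ++ aRstripSlash t := by
  unfold aRstripSlash
  rw [List.reverse_append, List.dropWhile_append]
  obtain ⟨c, hc, hcb⟩ := h
  have hne : (t.reverse.dropWhile (· == '/')).isEmpty = false := by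
    rw [List.isEmpty_eq_false_iff]
    simp only [ne_eq, List.dropWhile_eq_nil_iff]
    push_neg
    exact ⟨c, List.mem_reverse.mpr hc, by simp [hcb]⟩
  rw [hne]
  simp

lemma removeSuffix_eq : aRemoveSuffixGit = bRemoveSuffixGit := rfl

-- the two branch bodies agree, as functions of the tail after the prefix
lemma main_core (s : String) (t : List Char) :
    (if 2 ≤ (segs t).length then
        String.ofList ((segs t).getD 0 [] ++ '/' :: aRemoveSuffixGit ((segs t).getD 1 []))
      else s)
    = (match bPick t with
       | some out => String.ofList out
       | none => s) := by
  have hb : bPick t = if ownerOf t ≠ [] ∧ ownerOf (restOf t) ≠ [] then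
      some (ownerOf t ++ '/' :: bRemoveSuffixGit (ownerOf (restOf t))) else none := by
    simp [bPick, bPartSlash, bLstripSlash, ownerOf, restOf]
  rw [hb, segs_eq_owner t]
  by_cases h1 : ownerOf t = []
  · simp [h1]
  by_cases h2 : ownerOf (restOf t) = []
  · rw [segs_eq_owner (restOf t)]
    simp [h1, h2]
  · rw [segs_eq_owner (restOf t)]
    simp [h1, h2, removeSuffix_eq]

-- ===== VERDICT (by name: the statement is the Claim_ definition above) =====
set_option maxHeartbeats 2000000 in
theorem normalize_repo_ref_py_spec : Claim_equal_normalize_repo_ref_py := by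
  intro repo _ hpre
  unfold Spec_normalize_repo_ref_py
  unfold Pre_normalize_repo_ref_py pvBadRepo at hpre
  unfold normalize_repo_ref_py normalize_repo_ref_py_alt
  set cand := PySem.Str.strip repo with hcand
  by_cases h1 : PySem.Str.startswith cand "https://github.com/" = true
  · have h1c : PySem.Chars.startswith cand.toList "https://github.com/".toList = true := by
      rw [PySem.Str.startswith_eq] at h1; exact h1
    obtain ⟨t, ht⟩ := (PySem.Chars.startswith_iff _ _).mp h1c
    have hdrop : cand.toList.drop 19 = t := by
      rw [← ht, show (19:Nat) = ("https://github.com/".toList).length by decide, List.drop_left]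
    have hall : (cand.toList.drop 19).all (· == '/') = false := by
      simp only [h1c, Bool.true_and, Bool.or_eq_false_iff] at hpre
      exact hpre.1
    have hex : ∃ c ∈ t, (c == '/') = false := by
      rw [hdrop] at hall
      simpa [List.all_eq_false] using hall
    have hrst : aRstripSlash cand.toList = "https://github.com/".toList ++ aRstripSlash t := by
      rw [← ht, rstrip_append _ _ hex]
    have hsplit : PySem.Chars.splitMax? (aRstripSlash cand.toList) "github.com/".toList 1
        = some ["https://".toList, aRstripSlash t] := by
      rw [hrst]
      unfold PySem.Chars.splitMax?
      rw [if_neg (by decide : ¬("github.com/".toList.isEmpty = true))]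
      rw [splitOnMax_sep_https]
    have hget : PySem.List.pyGet? (["https://".toList, aRstripSlash t] : List (List Char)) 1
        = some (aRstripSlash t) := rfl
    simp only [h1, Bool.true_or, if_pos, hsplit, Option.getD_some, hget,
      filter_splitOn, segs_rstrip, hdrop]
    exact main_core cand t
  by_cases h2 : PySem.Str.startswith cand "http://github.com/" = true
  · have h2c : PySem.Chars.startswith cand.toList "http://github.com/".toList = true := by
      rw [PySem.Str.startswith_eq] at h2; exact h2
    obtain ⟨t, ht⟩ := (PySem.Chars.startswith_iff _ _).mp h2c
    have hdrop : cand.toList.drop 18 = t := by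
      rw [← ht, show (18:Nat) = ("http://github.com/".toList).length by decide, List.drop_left]
    have hall : (cand.toList.drop 18).all (· == '/') = false := by
      simp only [h2c, Bool.true_and, Bool.or_eq_false_iff] at hpre
      exact hpre.2
    have hex : ∃ c ∈ t, (c == '/') = false := by
      rw [hdrop] at hall
      simpa [List.all_eq_false] using hall
    have hrst : aRstripSlash cand.toList = "http://github.com/".toList ++ aRstripSlash t := by
      rw [← ht, rstrip_append _ _ hex]
    have hsplit : PySem.Chars.splitMax? (aRstripSlash cand.toList) "github.com/".toList 1
        = some ["http://".toList, aRstripSlash t] := by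
      rw [hrst]
      unfold PySem.Chars.splitMax?
      rw [if_neg (by decide : ¬("github.com/".toList.isEmpty = true))]
      rw [splitOnMax_sep_http]
    have hget : PySem.List.pyGet? (["http://".toList, aRstripSlash t] : List (List Char)) 1
        = some (aRstripSlash t) := rfl
    simp only [h2, Bool.or_eq_true, if_pos, hsplit, Option.getD_some, hget,
      filter_splitOn, segs_rstrip, hdrop]
    simp only [Bool.not_eq_true] at h1
    simp only [h1]
    exact main_core cand t
  · simp only [Bool.not_eq_true] at h1 h2
    have h1c := h1
    have h2c := h2
    rw [PySem.Str.startswith_eq] at h1c h2c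
    simp at h1c h2c
    simp [h1c, h2c]
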